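-- pv_equiv track=rewrite | github.com/peirin1230-ship-it/R8.kaitei | scripts/原文/merge_shinkyuu.py | build_master_order
-- ===== SOURCE A (Python) =====
-- def build_master_order(kokuji_order, tsuchi_order):
--     """告示の出現順をベースに、通知のみの項目を適切な位置に挿入したマスター順序を返す。
--
--     通知のみの項目は、通知での直前の共通項目の直後に挿入する。
--     """
--     kokuji_set = set(kokuji_order)
--     master = list(kokuji_order)
--
--     tsuchi_only = [k for k in tsuchi_order if k not in kokuji_set]
--
--     for key in tsuchi_only:
--         t_idx = tsuchi_order.index(key)
--         # 通知での直前の共通項目（告示にも存在する項目）を探す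
--         insert_after = None
--         for i in range(t_idx - 1, -1, -1):
--             if tsuchi_order[i] in kokuji_set:
--                 insert_after = tsuchi_order[i]
--                 break
--
--         if insert_after is not None:
--             pos = master.index(insert_after) + 1
--             # 既に挿入済みの通知のみ項目をスキップして、次の告示項目の手前に挿入
--             while pos < len(master) and master[pos] not in kokuji_set:
--                 pos += 1
--             master.insert(pos, key)
--         else:
--             # 直前に共通項目がない場合、通知での直後の共通項目の手前に挿入
--             insert_before = None
--             for i in range(t_idx + 1, len(tsuchi_order)):
--                 if tsuchi_order[i] in kokuji_set:
--                     insert_before = tsuchi_order[i]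
--                     break
--             if insert_before is not None:
--                 pos = master.index(insert_before)
--                 master.insert(pos, key)
--             else:
--                 # 前後に共通項目がない場合、末尾に追加
--                 master.append(key)
--
--     return master
-- ===== SOURCE B (Python) =====
-- def build_master_order(kokuji_order, tsuchi_order):
--     """One-pass rebuild: map each notice-only key to a splice gap, then emit."""
--     kokuji_set = set(kokuji_order)
--     n = len(kokuji_order)
--     first_pos = {}
--     for i, k in enumerate(kokuji_order):
--         first_pos.setdefault(k, i)
--     # gap for keys with no preceding common item: before the first common item of tsuchi
--     default_gap = n
--     for k in tsuchi_order:
--         if k in kokuji_set: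
--             default_gap = first_pos[k]
--             break
--     gap_of = {}
--     last = None
--     for k in tsuchi_order:
--         if k in kokuji_set:
--             last = k
--         elif k not in gap_of:
--             gap_of[k] = first_pos[last] + 1 if last is not None else default_gap
--     groups = {}
--     for k in tsuchi_order:
--         if k not in kokuji_set:
--             groups.setdefault(gap_of[k], []).append(k)
--     result = []
--     for i, x in enumerate(kokuji_order):
--         result.extend(groups.get(i, ()))
--         result.append(x)
--     result.extend(groups.get(n, ()))
--     return result
-- ===== Notes on version B (the rewrite author's own statement) =====
-- stated objective: faster
-- what changed: Instead of inserting each notice-only key into the growing master list via repeated .index scans and position skipping (quadratic), B computes in one pass a first-position map and each key's splice gap (after its nearest preceding common item, before the first common item, or the end), groups keys per gap, and emits the merged list in a single sweep.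
import Mathlib
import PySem

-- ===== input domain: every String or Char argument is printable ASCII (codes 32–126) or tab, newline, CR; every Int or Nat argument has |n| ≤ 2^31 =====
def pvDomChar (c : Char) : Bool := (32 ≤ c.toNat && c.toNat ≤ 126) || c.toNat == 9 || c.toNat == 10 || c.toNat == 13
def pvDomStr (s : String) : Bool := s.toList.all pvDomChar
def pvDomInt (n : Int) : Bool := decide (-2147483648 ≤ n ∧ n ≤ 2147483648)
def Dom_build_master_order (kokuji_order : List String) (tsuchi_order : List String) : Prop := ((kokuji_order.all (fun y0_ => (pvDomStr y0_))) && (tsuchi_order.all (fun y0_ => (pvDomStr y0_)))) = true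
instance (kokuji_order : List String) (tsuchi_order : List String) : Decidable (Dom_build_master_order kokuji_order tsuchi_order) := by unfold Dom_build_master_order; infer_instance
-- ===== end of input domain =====

-- B replaces A's quadratic insert-and-rescan loop by one pass: it maps every notice-only key
-- to a splice gap of the kokuji list and emits the result in a single sweep (objective: faster).


-- ===== PORT A =====
def pvFindScan (kset : PySem.Set String) (tsu : List String) : List Int → Option String
  | [] => none
  | i :: rest =>
      let v := PySem.List.pyGetD tsu i ""
      if kset.contains v then some v else pvFindScan kset tsu rest

def pvSkip (kset : PySem.Set String) (master : List String) (pos : Nat) : Nat :=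
  if h : pos < master.length then
    if kset.contains master[pos] then pos else pvSkip kset master (pos + 1)
  else pos
termination_by master.length - pos

def pvStepA (kset : PySem.Set String) (tsu : List String) (master : List String) (key : String) : List String :=
  let t_idx : Int := ((PySem.List.index? tsu key).getD 0 : Nat)
  match pvFindScan kset tsu (PySem.List.pyRange (t_idx - 1) (-1) (-1)) with
  | some insert_after =>
      let pos := (PySem.List.index? master insert_after).getD 0 + 1
      let pos := pvSkip kset master pos
      PySem.List.insert master (pos : Nat) key
  | none =>
      match pvFindScan kset tsu (PySem.List.pyRange (t_idx + 1) (tsu.length : Int) 1) with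
      | some insert_before =>
          PySem.List.insert master (((PySem.List.index? master insert_before).getD 0 : Nat) : Int) key
      | none => master ++ [key]

def build_master_order (kokuji_order : List String) (tsuchi_order : List String) : List String :=
  let kset := PySem.Set.ofList kokuji_order
  let tsuchi_only := tsuchi_order.filter (fun k => !(kset.contains k))
  tsuchi_only.foldl (fun master key => pvStepA kset tsuchi_order master key) kokuji_order

-- ===== PORT B =====
def pvFirstCommonGap (kset : PySem.Set String) (first_pos : PySem.Dict String Int) (n : Int) : List String → Int
  | [] => n
  | k :: rest =>
      if kset.contains k then first_pos.getD k 0 else pvFirstCommonGap kset first_pos n rest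

def build_master_order_alt (kokuji_order : List String) (tsuchi_order : List String) : List String :=
  let kset := PySem.Set.ofList kokuji_order
  let n : Int := kokuji_order.length
  let first_pos : PySem.Dict String Int :=
    (PySem.List.enumerate kokuji_order 0).foldl (fun d p => d.setdefault p.2 p.1) PySem.Dict.empty
  let default_gap : Int := pvFirstCommonGap kset first_pos n tsuchi_order
  let st : PySem.Dict String Int × Option String :=
    tsuchi_order.foldl (fun st k =>
      if kset.contains k then (st.1, some k)
      else if st.1.contains k then st
      else match st.2 with
        | some last => (st.1.insert k (first_pos.getD last 0 + 1), st.2)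
        | none => (st.1.insert k default_gap, st.2)) (PySem.Dict.empty, none)
  let gap_of := st.1
  let groups : PySem.Dict Int (List String) :=
    tsuchi_order.foldl (fun g k =>
      if kset.contains k then g
      else g.modify (gap_of.getD k 0) [] (fun l => l ++ [k])) PySem.Dict.empty
  let result :=
    (PySem.List.enumerate kokuji_order 0).foldl (fun res p => (res ++ groups.getD p.1 []) ++ [p.2]) []
  result ++ groups.getD n []

-- ===== PRECONDITION & SPEC =====
def Spec_build_master_order (kokuji_order : List String) (tsuchi_order : List String) (out : List String) : Prop := out = build_master_order_alt kokuji_order tsuchi_order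
instance (kokuji_order : List String) (tsuchi_order : List String) (out : List String) : Decidable (Spec_build_master_order kokuji_order tsuchi_order out) := by unfold Spec_build_master_order; infer_instance

-- ===== CLAIM (what is proved, stated in full; the proofs are below) =====
def Claim_equal_build_master_order : Prop := ∀ (kokuji_order : List String) (tsuchi_order : List String), Dom_build_master_order kokuji_order tsuchi_order → Spec_build_master_order kokuji_order tsuchi_order (build_master_order kokuji_order tsuchi_order)

-- ===== LEMMAS AND PROOFS =====
-- `gapRender ks G` : the kokuji list with the group `G i` spliced in front of its i-th
-- element (and `G ks.length` at the end); both programs are reduced to this shape.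
def gapRender (ks : List String) (G : Nat → List String) : List String :=
  match ks with
  | [] => G 0
  | x :: t => G 0 ++ x :: gapRender t (fun i => G (i + 1))
def gapBump (G : Nat → List String) (g : Nat) (k : String) : Nat → List String :=
  fun i => if i = g then G i ++ [k] else G i
def lastCommon (kset : PySem.Set String) (l : List String) : Option String :=
  l.foldl (fun acc k => if kset.contains k then some k else acc) none
def firstCommon (kset : PySem.Set String) : List String → Option String
  | [] => none
  | x :: t => if kset.contains x then some x else firstCommon kset t

theorem gapRender_congr {ks : List String} {G G' : Nat → List String}
    (h : ∀ i, G i = G' i) : gapRender ks G = gapRender ks G' := by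
  induction ks generalizing G G' with
  | nil => exact h 0
  | cons x t ih => simp [gapRender, h 0, ih (fun i => h (i+1))]

theorem pvSkip_eq (kset : PySem.Set String) (m : List String) (p : Nat) :
    pvSkip kset m p = if h : p < m.length then
      (if kset.contains m[p] then p else pvSkip kset m (p + 1)) else p := by
  rw [pvSkip]

theorem index?_append_not_mem {l r : List String} {v : String} (h : v ∉ l) :
    PySem.List.index? (l ++ r) v = (PySem.List.index? r v).map (l.length + ·) := by
  induction l with
  | nil => simp
  | cons x t ih =>
    have hx : x ≠ v := fun e => h (by simp [e])
    rw [List.cons_append, PySem.List.index?_cons_of_ne (t ++ r) hx, ih (fun hm => h (by simp [hm]))]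
    rw [Option.map_map]
    rcases PySem.List.index? r v with _ | n <;> simp <;> omega

theorem insert_append_shift (l m : List String) (p : Nat) (v : String) (hp : p ≤ m.length) :
    PySem.List.insert (l ++ m) ((l.length + p : Nat) : Int) v = l ++ PySem.List.insert m (p : Nat) v := by
  rw [PySem.List.insert_natCast _ _ _ (by simp; omega), PySem.List.insert_natCast _ _ _ hp]
  rw [List.take_append, List.drop_append, List.take_of_length_le (by omega),
    List.drop_eq_nil_of_le (by omega), Nat.add_sub_cancel_left]
  simp

theorem insert_gapRender_zero (ks : List String) (G : Nat → List String) (k : String) :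
    PySem.List.insert (gapRender ks G) ((G 0).length : Nat) k = gapRender ks (gapBump G 0 k) := by
  cases ks with
  | nil =>
    show PySem.List.insert (G 0) ((G 0).length : Nat) k = G 0 ++ [k]
    rw [PySem.List.insert_natCast _ _ _ (le_refl _)]
    simp
  | cons x t =>
    show PySem.List.insert (G 0 ++ x :: gapRender t (fun i => G (i+1))) ((G 0).length : Nat) k = _
    rw [PySem.List.insert_natCast _ _ _ (by simp)]
    rw [List.take_append, List.drop_append, List.take_of_length_le (le_refl _),
      List.drop_eq_nil_of_le (le_refl _), Nat.sub_self]
    rw [show gapRender (x::t) (gapBump G 0 k) = gapBump G 0 k 0 ++ x :: gapRender t (fun i => gapBump G 0 k (i+1)) from rfl]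
    rw [gapRender_congr (G := fun i => gapBump G 0 k (i+1)) (G' := fun i => G (i+1)) (fun i => by simp [gapBump])]
    simp [gapBump]

theorem append_render (ks : List String) (G : Nat → List String) (k : String) :
    gapRender ks G ++ [k] = gapRender ks (gapBump G ks.length k) := by
  induction ks generalizing G with
  | nil => simp [gapRender, gapBump]
  | cons x t ih =>
    rw [show gapRender (x::t) G = G 0 ++ x :: gapRender t (fun i => G (i+1)) from rfl]
    rw [show (x :: t : List String).length = t.length + 1 from rfl,
      show gapRender (x::t) (gapBump G (t.length+1) k) = gapBump G (t.length+1) k 0 ++ x :: gapRender t (fun i => gapBump G (t.length+1) k (i+1)) from rfl]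
    rw [show gapBump G (t.length+1) k 0 = G 0 by simp [gapBump]]
    have h2 : (fun i => gapBump G (t.length+1) k (i+1)) = gapBump (fun i => G (i+1)) t.length k := by
      funext i; simp [gapBump]
    rw [h2, ← ih]
    simp

theorem pvSkip_nil (kset : PySem.Set String) (p : Nat) : pvSkip kset [] p = p := by
  rw [pvSkip_eq]; simp

theorem pvSkip_prefix (kset : PySem.Set String) (l m : List String) (p : Nat) :
    pvSkip kset (l ++ m) (l.length + p) = l.length + pvSkip kset m p := by
  induction hn : m.length - p generalizing p with
  | zero =>
    conv_lhs => rw [pvSkip_eq]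
    conv_rhs => rw [pvSkip_eq]
    rw [dif_neg (by simp; omega), dif_neg (by omega)]
  | succ n ih =>
    have hp : p < m.length := by omega
    conv_lhs => rw [pvSkip_eq]
    conv_rhs => rw [pvSkip_eq]
    rw [dif_pos (by simp; omega), dif_pos hp]
    have he : (l ++ m)[l.length + p]'(by simp; omega) = m[p] := by
      rw [List.getElem_append_right (by omega)]
      congr 1; omega
    rw [he]
    by_cases hc : kset.contains m[p] = true
    · rw [if_pos hc, if_pos hc]
    · rw [if_neg hc, if_neg hc]
      have := ih (p+1) (by omega)
      omega

theorem pvSkip_bad_prefix (kset : PySem.Set String) {b : List String} (r : List String)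
    (hb : ∀ s ∈ b, kset.contains s = false) :
    pvSkip kset (b ++ r) 0 = b.length + pvSkip kset r 0 := by
  induction b with
  | nil => simp
  | cons s b' ih =>
    rw [show (s :: b' ++ r : List String) = s :: (b' ++ r) by simp]
    conv_lhs => rw [pvSkip_eq]
    rw [dif_pos (by simp)]
    rw [show ((s :: (b' ++ r)))[0]'(by simp) = s from rfl]
    rw [if_neg (by rw [hb s (by simp)]; simp)]
    have h1 : pvSkip kset (s :: (b' ++ r)) (0 + 1) = 1 + pvSkip kset (b' ++ r) 0 := by
      have := pvSkip_prefix kset [s] (b' ++ r) 0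
      simpa using this
    rw [h1, ih (fun y hy => hb y (by simp [hy]))]
    simp; omega

theorem pvSkip_render_zero (kset : PySem.Set String) {ks : List String} {G : Nat → List String}
    (hGood : ∀ x ∈ ks, kset.contains x = true) (h0 : ∀ s ∈ G 0, kset.contains s = false) :
    pvSkip kset (gapRender ks G) 0 = (G 0).length := by
  cases ks with
  | nil =>
    rw [show gapRender [] G = G 0 ++ [] by simp [gapRender]]
    rw [pvSkip_bad_prefix kset [] h0, pvSkip_nil]
    simp
  | cons x t =>
    rw [show gapRender (x::t) G = G 0 ++ (x :: gapRender t fun i => G (i+1)) from rfl]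
    rw [pvSkip_bad_prefix kset _ h0]
    conv_lhs => rw [pvSkip_eq]
    rw [dif_pos (by simp)]
    simp only [List.getElem_cons_zero]
    rw [if_pos (hGood x (by simp))]
    omega
theorem mem_gapRender {ks : List String} {G : Nat → List String} {x : String}
    (h : x ∈ ks) : x ∈ gapRender ks G := by
  induction ks generalizing G with
  | nil => cases h
  | cons y t ih =>
    rcases List.mem_cons.1 h with h | h
    · simp [gapRender, h]
    · simp [gapRender, ih h]

theorem gapBump_shift (G : Nat → List String) (g : Nat) (k : String) :
    (fun i => gapBump G (g + 1) k (i + 1)) = gapBump (fun i => G (i + 1)) g k := by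
  funext i
  simp [gapBump]

def pvBad (kset : PySem.Set String) (G : Nat → List String) : Prop :=
  ∀ i s, s ∈ G i → kset.contains s = false

theorem index?_le_length {xs : List String} {v : String} {j : Nat}
    (h : PySem.List.index? xs v = some j) : j ≤ xs.length := by
  rcases (PySem.List.index?_eq_some_iff xs v j).1 h with ⟨pre, suf, rfl, rfl, -⟩
  simp

theorem pvSkip_le_length (kset : PySem.Set String) (m : List String) (p : Nat)
    (hp : p ≤ m.length) : pvSkip kset m p ≤ m.length := by
  induction hn : m.length - p generalizing p with
  | zero =>
    rw [pvSkip_eq, dif_neg (by omega)]; omega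
  | succ n ih =>
    have hp' : p < m.length := by omega
    rw [pvSkip_eq, dif_pos hp']
    by_cases hc : kset.contains m[p] = true
    · rw [if_pos hc]; omega
    · rw [if_neg hc]; exact ih (p+1) (by omega) (by omega)

theorem length_g0_le_render (ks : List String) (G : Nat → List String) :
    (G 0).length ≤ (gapRender ks G).length := by
  cases ks with
  | nil => simp [gapRender]
  | cons x t => simp [gapRender]

theorem insert_before_render (kset : PySem.Set String) {ks : List String} {G : Nat → List String}
    {c : String} (hBad : pvBad kset G) (hc : kset.contains c = true) (hmem : c ∈ ks) (k : String) :
    PySem.List.insert (gapRender ks G) (((PySem.List.index? (gapRender ks G) c).getD 0 : Nat) : Int) k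
      = gapRender ks (gapBump G ((PySem.List.index? ks c).getD 0) k) := by
  induction ks generalizing G with
  | nil => cases hmem
  | cons x t ih =>
    have hcG0 : c ∉ G 0 := fun hm => by rw [hBad 0 c hm] at hc; cases hc
    rw [show gapRender (x::t) G = G 0 ++ (x :: gapRender t fun i => G (i+1)) from rfl]
    by_cases hxc : x = c
    · subst hxc
      rw [index?_append_not_mem hcG0, PySem.List.index?_cons_self]
      simp only [Option.map_some, Option.getD_some, Nat.add_zero]
      rw [show (G 0 ++ (x :: gapRender t fun i => G (i+1))) = gapRender (x::t) G from rfl]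
      rw [insert_gapRender_zero]
      rw [PySem.List.index?_cons_self]
      rfl
    · have hct : c ∈ t := by rcases List.mem_cons.1 hmem with h | h; exact absurd h.symm hxc; exact h
      have hmr : c ∈ gapRender t (fun i => G (i+1)) := mem_gapRender hct
      obtain ⟨j, hj⟩ := Option.isSome_iff_exists.1 ((PySem.List.index?_isSome_iff _ _).2 hmr)
      rw [index?_append_not_mem hcG0, PySem.List.index?_cons_of_ne _ (Ne.symm (hxc ∘ Eq.symm) : x ≠ c), hj]
      simp only [Option.map_some, Option.getD_some]
      have hrw : G 0 ++ (x :: gapRender t fun i => G (i+1)) = (G 0 ++ [x]) ++ gapRender t (fun i => G (i+1)) := by simp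
      rw [hrw]
      have hlen : (G 0).length + (j + 1) = (G 0 ++ [x]).length + j := by simp; omega
      rw [hlen, insert_append_shift _ _ _ _ (index?_le_length hj)]
      have hBt : pvBad kset (fun i => G (i+1)) := fun i s hs => hBad (i+1) s hs
      have := ih (G := fun i => G (i+1)) hBt hct
      rw [hj] at this
      simp only [Option.getD_some] at this
      rw [this]
      obtain ⟨j', hj'⟩ := Option.isSome_iff_exists.1 ((PySem.List.index?_isSome_iff _ _).2 hct)
      rw [PySem.List.index?_cons_of_ne _ (Ne.symm (hxc ∘ Eq.symm) : x ≠ c), hj']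
      simp only [Option.map_some, Option.getD_some]
      rw [show gapRender (x::t) (gapBump G ((j' : Nat)+1) k) = gapBump G (j'+1) k 0 ++ (x :: gapRender t fun i => gapBump G (j'+1) k (i+1)) from rfl]
      rw [show gapBump G (j'+1) k 0 = G 0 by simp [gapBump]]
      rw [show (fun i => gapBump G (j'+1) k (i+1)) = gapBump (fun i => G (i+1)) j' k from gapBump_shift G j' k]
      simp

theorem insert_after_render (kset : PySem.Set String) {ks : List String} {G : Nat → List String}
    {a : String} (hBad : pvBad kset G) (hGood : ∀ x ∈ ks, kset.contains x = true) (hmem : a ∈ ks) (k : String) :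
    PySem.List.insert (gapRender ks G)
        ((pvSkip kset (gapRender ks G) ((PySem.List.index? (gapRender ks G) a).getD 0 + 1) : Nat) : Int) k
      = gapRender ks (gapBump G ((PySem.List.index? ks a).getD 0 + 1) k) := by
  induction ks generalizing G with
  | nil => cases hmem
  | cons x t ih =>
    have ha : kset.contains a = true := hGood a hmem
    have haG0 : a ∉ G 0 := fun hm => by rw [hBad 0 a hm] at ha; cases ha
    have hBt : pvBad kset (fun i => G (i+1)) := fun i s hs => hBad (i+1) s hs
    rw [show gapRender (x::t) G = G 0 ++ (x :: gapRender t fun i => G (i+1)) from rfl]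
    by_cases hxa : x = a
    · subst hxa
      rw [index?_append_not_mem haG0, PySem.List.index?_cons_self]
      simp only [Option.map_some, Option.getD_some, Nat.add_zero]
      have hsplit : G 0 ++ (x :: gapRender t fun i => G (i+1)) = (G 0 ++ [x]) ++ gapRender t (fun i => G (i+1)) := by simp
      rw [hsplit]
      have hskip : pvSkip kset ((G 0 ++ [x]) ++ gapRender t (fun i => G (i+1))) ((G 0).length + 1)
          = (G 0 ++ [x]).length + pvSkip kset (gapRender t (fun i => G (i+1))) 0 := by
        rw [show (G 0).length + 1 = (G 0 ++ [x]).length + 0 by simp]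
        exact pvSkip_prefix kset _ _ 0
      rw [hskip, pvSkip_render_zero kset (fun y hy => hGood y (by simp [hy])) (fun s hs => hBt 0 s hs)]
      rw [insert_append_shift _ _ _ _ (length_g0_le_render _ _)]
      rw [insert_gapRender_zero t (fun i => G (i+1)) k]
      rw [PySem.List.index?_cons_self]
      simp only [Option.getD_some, Nat.zero_add]
      rw [show gapRender (x::t) (gapBump G (0+1) k) = gapBump G 1 k 0 ++ (x :: gapRender t fun i => gapBump G (0+1) k (i+1)) from rfl]
      rw [show (fun i => gapBump G (0+1) k (i+1)) = gapBump (fun i => G (i+1)) 0 k from gapBump_shift G 0 k]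
      rw [show gapBump G 1 k 0 = G 0 by simp [gapBump]]
      simp
    · have hat : a ∈ t := by rcases List.mem_cons.1 hmem with h | h; exact absurd h.symm hxa; exact h
      have hmr : a ∈ gapRender t (fun i => G (i+1)) := mem_gapRender hat
      obtain ⟨j, hj⟩ := Option.isSome_iff_exists.1 ((PySem.List.index?_isSome_iff _ _).2 hmr)
      rw [index?_append_not_mem haG0, PySem.List.index?_cons_of_ne _ (Ne.symm (hxa ∘ Eq.symm) : x ≠ a), hj]
      simp only [Option.map_some, Option.getD_some]
      have hsplit : G 0 ++ (x :: gapRender t fun i => G (i+1)) = (G 0 ++ [x]) ++ gapRender t (fun i => G (i+1)) := by simp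
      rw [hsplit]
      have hskip : pvSkip kset ((G 0 ++ [x]) ++ gapRender t (fun i => G (i+1))) ((G 0).length + (j + 1) + 1)
          = (G 0 ++ [x]).length + pvSkip kset (gapRender t (fun i => G (i+1))) (j + 1) := by
        rw [show (G 0).length + (j + 1) + 1 = (G 0 ++ [x]).length + (j + 1) by simp; omega]
        exact pvSkip_prefix kset _ _ _
      rw [hskip]
      have hple : pvSkip kset (gapRender t (fun i => G (i+1))) (j + 1) ≤ (gapRender t (fun i => G (i+1))).length := by
        apply pvSkip_le_length
        have := index?_le_length hj
        rcases (PySem.List.index?_eq_some_iff _ _ _).1 hj with ⟨pre, suf, heq, rfl, -⟩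
        rw [heq]; simp
      rw [insert_append_shift _ _ _ _ hple]
      have := ih (G := fun i => G (i+1)) hBt (fun y hy => hGood y (by simp [hy])) hat
      rw [hj] at this
      simp only [Option.getD_some] at this
      rw [this]
      obtain ⟨j', hj'⟩ := Option.isSome_iff_exists.1 ((PySem.List.index?_isSome_iff _ _).2 hat)
      rw [hj']
      simp only [Option.getD_some]
      rw [PySem.List.index?_cons_of_ne _ (Ne.symm (hxa ∘ Eq.symm) : x ≠ a), hj']
      simp only [Option.map_some, Option.getD_some]
      rw [show gapRender (x::t) (gapBump G (j'+1+1) k) = gapBump G (j'+1+1) k 0 ++ (x :: gapRender t fun i => gapBump G (j'+1+1) k (i+1)) from rfl]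
      rw [show (fun i => gapBump G (j'+1+1) k (i+1)) = gapBump (fun i => G (i+1)) (j'+1) k from gapBump_shift G (j'+1) k]
      rw [show gapBump G (j'+1+1) k 0 = G 0 by simp [gapBump]]
      simp
theorem lastCommon_append_singleton (kset : PySem.Set String) (l : List String) (x : String) :
    lastCommon kset (l ++ [x]) = if kset.contains x then some x else lastCommon kset l := by
  simp [lastCommon, List.foldl_append]

theorem lastCommon_eq_none_iff (kset : PySem.Set String) (l : List String) :
    lastCommon kset l = none ↔ ∀ x ∈ l, kset.contains x = false := by
  induction l using List.reverseRecOn with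
  | nil => simp [lastCommon]
  | append_singleton l x ih =>
    rw [lastCommon_append_singleton]
    by_cases hx : kset.contains x = true
    · rw [if_pos hx]
      constructor
      · intro h; cases h
      · intro h; have hf := h x (by simp); rw [hf] at hx; cases hx
    · rw [if_neg hx, ih]
      constructor
      · intro h y hy
        rcases List.mem_append.1 hy with hy | hy
        · exact h y hy
        · simp at hy; subst hy; exact Bool.eq_false_iff.2 hx
      · intro h y hy; exact h y (by simp [hy])

theorem lastCommon_spec (kset : PySem.Set String) {l : List String} {a : String}
    (h : lastCommon kset l = some a) : kset.contains a = true := by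
  induction l using List.reverseRecOn with
  | nil => simp [lastCommon] at h
  | append_singleton l x ih =>
    rw [lastCommon_append_singleton] at h
    by_cases hx : kset.contains x = true
    · rw [if_pos hx] at h; cases h; exact hx
    · rw [if_neg hx] at h; exact ih h

theorem firstCommon_spec (kset : PySem.Set String) {l : List String} {c : String}
    (h : firstCommon kset l = some c) : kset.contains c = true := by
  induction l with
  | nil => simp [firstCommon] at h
  | cons x t ih =>
    by_cases hx : kset.contains x = true
    · rw [firstCommon, if_pos hx] at h; cases h; exact hx
    · rw [firstCommon, if_neg hx] at h; exact ih h

theorem firstCommon_append_of_bad (kset : PySem.Set String) {l : List String} (r : List String)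
    (h : ∀ x ∈ l, kset.contains x = false) :
    firstCommon kset (l ++ r) = firstCommon kset r := by
  induction l with
  | nil => rfl
  | cons x t ih =>
    have hx := h x (by simp)
    rw [List.cons_append, firstCommon, if_neg (fun hc => by rw [hx] at hc; cases hc)]
    exact ih (fun y hy => h y (by simp [hy]))

theorem contains_ofList_iff {kok : List String} {x : String} :
    (PySem.Set.ofList kok).contains x = true ↔ x ∈ kok := by
  rw [PySem.Set.contains_iff, PySem.Set.mem_ofList]

theorem pyGetD_mid (l : List String) (x : String) (r : List String) :
    PySem.List.pyGetD (l ++ x :: r) (l.length : Int) "" = x := by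
  rw [PySem.List.pyGetD_natCast]
  simp [List.getD]

theorem backScan_eq (kset : PySem.Set String) (pre rest : List String) :
    pvFindScan kset (pre ++ rest) (PySem.List.pyRange ((pre.length : Int) - 1) (-1) (-1))
      = lastCommon kset pre := by
  induction pre using List.reverseRecOn generalizing rest with
  | nil =>
    rw [show ((([] : List String).length : Int) - 1) = -1 by simp]
    rw [PySem.List.pyRange_neg_one_eq_nil (le_refl _)]
    rfl
  | append_singleton pre x ih =>
    have hlen : (((pre ++ [x]).length : Int) - 1) = (pre.length : Int) := by simp
    rw [hlen, PySem.List.pyRange_neg_one_cons (by omega)]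
    rw [show (pre ++ [x]) ++ rest = pre ++ (x :: rest) by simp]
    show (if kset.contains (PySem.List.pyGetD (pre ++ x :: rest) (pre.length : Int) "") then _ else _) = _
    rw [pyGetD_mid]
    rw [lastCommon_append_singleton]
    by_cases hx : kset.contains x = true
    · rw [if_pos hx, if_pos hx]
    · rw [if_neg hx, if_neg hx]
      exact ih (x :: rest)

theorem fwdScan_eq (kset : PySem.Set String) (suf : List String) : ∀ pre : List String,
    pvFindScan kset (pre ++ suf) (PySem.List.pyRange (pre.length : Int) ((pre ++ suf).length : Int) 1)
      = firstCommon kset suf := by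
  induction suf with
  | nil =>
    intro pre
    rw [PySem.List.pyRange_one_eq_nil (by simp)]
    rfl
  | cons s suf' ih =>
    intro pre
    rw [PySem.List.pyRange_one_cons (by simp)]
    show (if kset.contains (PySem.List.pyGetD (pre ++ s :: suf') (pre.length : Int) "") then _ else _) = _
    rw [pyGetD_mid]
    by_cases hs : kset.contains s = true
    · rw [if_pos hs]
      show _ = firstCommon kset (s :: suf')
      rw [firstCommon, if_pos hs]
    · rw [if_neg hs]
      have h2 := ih (pre ++ [s])
      rw [show (pre ++ [s]) ++ suf' = pre ++ (s :: suf') by simp] at h2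
      rw [show ((pre ++ [s]).length : Int) = (pre.length : Int) + 1 by simp] at h2
      rw [h2]
      show _ = firstCommon kset (s :: suf')
      rw [firstCommon, if_neg hs]

def gapOf (kset : PySem.Set String) (kok tsu : List String) (k : String) : Nat :=
  match lastCommon kset (tsu.take ((PySem.List.index? tsu k).getD 0)) with
  | some a => (PySem.List.index? kok a).getD 0 + 1
  | none =>
      match firstCommon kset tsu with
      | some c => (PySem.List.index? kok c).getD 0
      | none => kok.length

theorem stepA_eq {kok tsu : List String} {G : Nat → List String} {k : String}
    (hBad : pvBad (PySem.Set.ofList kok) G) (hk : k ∈ tsu)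
    (hbad : (PySem.Set.ofList kok).contains k = false) :
    pvStepA (PySem.Set.ofList kok) tsu (gapRender kok G) k
      = gapRender kok (gapBump G (gapOf (PySem.Set.ofList kok) kok tsu k) k) := by
  have hGood : ∀ x ∈ kok, (PySem.Set.ofList kok).contains x = true := fun x hx => contains_ofList_iff.2 hx
  obtain ⟨tIdx, hIdx⟩ := Option.isSome_iff_exists.1 ((PySem.List.index?_isSome_iff tsu k).2 hk)
  obtain ⟨pre, suf, heq, hlen, hnp⟩ := (PySem.List.index?_eq_some_iff tsu k tIdx).1 hIdx
  subst heq
  subst hlen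
  have htake : (pre ++ k :: suf).take pre.length = pre := by
    rw [List.take_append_of_le_length (le_refl _), List.take_length]
  simp only [pvStepA, gapOf, hIdx, Option.getD_some, htake]
  rw [backScan_eq (PySem.Set.ofList kok) pre (k :: suf)]
  cases hlc : lastCommon (PySem.Set.ofList kok) pre with
  | some a =>
    have hamem : a ∈ kok := contains_ofList_iff.1 (lastCommon_spec _ hlc)
    exact insert_after_render (PySem.Set.ofList kok) hBad hGood hamem k
  | none =>
    have hfs := fwdScan_eq (PySem.Set.ofList kok) suf (pre ++ [k])
    rw [show (pre ++ [k]) ++ suf = pre ++ (k :: suf) by simp] at hfs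
    rw [show ((pre ++ [k]).length : Int) = (pre.length : Int) + 1 by simp] at hfs
    rw [hfs]
    have hbadpre : ∀ x ∈ pre ++ [k], (PySem.Set.ofList kok).contains x = false := by
      intro x hx
      rcases List.mem_append.1 hx with hx | hx
      · exact (lastCommon_eq_none_iff _ _).1 hlc x hx
      · simp at hx; subst hx; exact hbad
    have hfc : firstCommon (PySem.Set.ofList kok) (pre ++ (k :: suf)) = firstCommon (PySem.Set.ofList kok) suf := by
      rw [show pre ++ (k :: suf) = (pre ++ [k]) ++ suf by simp]
      exact firstCommon_append_of_bad _ suf hbadpre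
    rw [hfc]
    cases hfcv : firstCommon (PySem.Set.ofList kok) suf with
    | some c =>
      have hcmem : c ∈ kok := contains_ofList_iff.1 (firstCommon_spec _ hfcv)
      exact insert_before_render (PySem.Set.ofList kok) hBad (firstCommon_spec _ hfcv) hcmem k
    | none => exact append_render kok G k

theorem A_loop {kok tsu : List String} : ∀ (l : List String) (G : Nat → List String),
    (∀ x ∈ l, (PySem.Set.ofList kok).contains x = false ∧ x ∈ tsu) →
    pvBad (PySem.Set.ofList kok) G →
    l.foldl (fun m key => pvStepA (PySem.Set.ofList kok) tsu m key) (gapRender kok G)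
      = gapRender kok (l.foldl (fun G k => gapBump G (gapOf (PySem.Set.ofList kok) kok tsu k) k) G) := by
  intro l
  induction l with
  | nil => intro G _ _; rfl
  | cons k l' ih =>
    intro G hl hBad
    simp only [List.foldl_cons]
    rw [stepA_eq hBad (hl k (by simp)).2 (hl k (by simp)).1]
    apply ih _ (fun x hx => hl x (by simp [hx]))
    intro i s hs
    by_cases hig : i = gapOf (PySem.Set.ofList kok) kok tsu k
    · rw [show gapBump G (gapOf (PySem.Set.ofList kok) kok tsu k) k i = G i ++ [k] by rw [gapBump, if_pos hig]] at hs
      rcases List.mem_append.1 hs with hs | hs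
      · exact hBad i s hs
      · simp at hs; subst hs; exact (hl s (by simp)).1
    · rw [show gapBump G (gapOf (PySem.Set.ofList kok) kok tsu k) k i = G i by rw [gapBump, if_neg hig]] at hs
      exact hBad i s hs

theorem foldl_gapBump_apply (gp : String → Nat) (l : List String) : ∀ (G : Nat → List String) (i : Nat),
    (l.foldl (fun G k => gapBump G (gp k) k) G) i = G i ++ l.filter (fun k => gp k == i) := by
  induction l with
  | nil => intro G i; simp
  | cons k l' ih =>
    intro G i
    simp only [List.foldl_cons, List.filter_cons]
    rw [ih]
    by_cases hig : gp k = i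
    · rw [show (gp k == i) = true by simp [hig]]
      rw [show gapBump G (gp k) k i = G i ++ [k] by rw [gapBump, if_pos hig.symm]]
      simp
    · rw [show (gp k == i) = false by simp [hig]]
      rw [show gapBump G (gp k) k i = G i by rw [gapBump, if_neg (fun h => hig h.symm)]]
      simp

theorem setdefault_eq_insert {d : PySem.Dict String Int} {k : String} {v : Int} :
    d.setdefault k v = if d.contains k then d else d.insert k v := by
  by_cases h : d.contains k = true
  · simp [PySem.Dict.setdefault, h]
  · rw [if_neg h]
    apply PySem.Dict.ext
    rw [PySem.Dict.items_insert_of_not_contains d v (Bool.eq_false_iff.2 h)]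
    simp [PySem.Dict.setdefault, h]

theorem fp_get (a : String) : ∀ (l : List String) (s : Int) (d : PySem.Dict String Int),
    ((PySem.List.enumerate l s).foldl (fun d p => d.setdefault p.2 p.1) d).get? a
      = if (d.get? a).isSome then d.get? a
        else (PySem.List.index? l a).map (fun n => s + n) := by
  intro l
  induction l with
  | nil =>
    intro s d
    cases hd : d.get? a <;> simp [PySem.List.enumerate, hd]
  | cons x t ih =>
    intro s d
    rw [PySem.List.enumerate_cons]
    simp only [List.foldl_cons]
    rw [ih (s+1) (d.setdefault x s), setdefault_eq_insert]
    by_cases hax : a = x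
    · subst hax
      by_cases hc : d.contains a = true
      · rw [if_pos hc]
        have hs : (d.get? a).isSome := by rw [PySem.Dict.contains_eq_isSome_get?] at hc; exact hc
        rw [if_pos hs, if_pos hs]
      · rw [if_neg hc]
        have hnone : d.get? a = none := by
          rw [PySem.Dict.contains_eq_isSome_get?] at hc
          exact Option.not_isSome_iff_eq_none.1 (fun hh => hc hh)
        rw [PySem.Dict.get?_insert_self d a s, hnone]
        simp only [Option.isSome_none, Bool.false_eq_true, if_false]
        rw [PySem.List.index?_cons_self]
        simp
    · have hd' : (if d.contains x = true then d else d.insert x s).get? a = d.get? a := by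
        by_cases hcx : d.contains x = true
        · rw [if_pos hcx]
        · rw [if_neg hcx]; exact PySem.Dict.get?_insert_of_ne d s hax
      rw [hd']
      by_cases hs : (d.get? a).isSome = true
      · rw [if_pos hs, if_pos hs]
      · rw [if_neg hs, if_neg hs]
        rw [PySem.List.index?_cons_of_ne t (fun e => hax e.symm)]
        cases hidx : PySem.List.index? t a <;> simp <;> omega

theorem firstpos_getD {kok : List String} {a : String} (h : a ∈ kok) :
    ((PySem.List.enumerate kok 0).foldl (fun d p => d.setdefault p.2 p.1) PySem.Dict.empty).getD a 0
      = ((PySem.List.index? kok a).getD 0 : Nat) := by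
  obtain ⟨j, hj⟩ := Option.isSome_iff_exists.1 ((PySem.List.index?_isSome_iff kok a).2 h)
  simp only [PySem.Dict.getD]
  rw [fp_get a kok 0 PySem.Dict.empty]
  rw [PySem.Dict.get?_empty]
  simp only [Option.isSome_none, Bool.false_eq_true, if_false]
  rw [hj]
  simp

theorem firstCommonGap_eq (kok : List String) : ∀ tsu : List String,
    pvFirstCommonGap (PySem.Set.ofList kok)
        ((PySem.List.enumerate kok 0).foldl (fun d p => d.setdefault p.2 p.1) PySem.Dict.empty)
        (kok.length : Int) tsu
      = (match firstCommon (PySem.Set.ofList kok) tsu with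
        | some c => (((PySem.List.index? kok c).getD 0 : Nat) : Int)
        | none => (kok.length : Int)) := by
  intro tsu
  induction tsu with
  | nil => rfl
  | cons k rest ih =>
    by_cases hc : (PySem.Set.ofList kok).contains k = true
    · rw [pvFirstCommonGap, if_pos hc, firstCommon, if_pos hc]
      exact firstpos_getD (contains_ofList_iff.1 hc)
    · rw [pvFirstCommonGap, if_neg hc, firstCommon, if_neg hc]
      exact ih

theorem gapArg_append (kset : PySem.Set String) (fp : PySem.Dict String Int) (dflt : Int)
    (l : List String) (x k : String) (h : k ∈ l ∨ k ∉ (l ++ [x])) :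
    (PySem.List.index? (l ++ [x]) k).map (fun t =>
        match lastCommon kset ((l ++ [x]).take t) with
        | some a => fp.getD a 0 + 1
        | none => dflt)
      = (PySem.List.index? l k).map (fun t =>
        match lastCommon kset (l.take t) with
        | some a => fp.getD a 0 + 1
        | none => dflt) := by
  rcases h with h | h
  · rw [PySem.List.index?_append_of_mem [x] h]
    obtain ⟨t0, ht0⟩ := Option.isSome_iff_exists.1 ((PySem.List.index?_isSome_iff l k).2 h)
    rw [ht0]
    simp only [Option.map_some]
    rw [List.take_append_of_le_length (index?_le_length ht0)]
  · rw [(PySem.List.index?_eq_none_iff _ _).2 h,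
      (PySem.List.index?_eq_none_iff _ _).2 (fun hm => h (by simp [hm]))]
    rfl

def gapStep (kset : PySem.Set String) (fp : PySem.Dict String Int) (dflt : Int)
    (st : PySem.Dict String Int × Option String) (k : String) : PySem.Dict String Int × Option String :=
  if kset.contains k then (st.1, some k)
  else if st.1.contains k then st
  else match st.2 with
    | some last => (st.1.insert k (fp.getD last 0 + 1), st.2)
    | none => (st.1.insert k dflt, st.2)

theorem gapStep_snd (kset : PySem.Set String) (fp : PySem.Dict String Int) (dflt : Int)
    (S : PySem.Dict String Int × Option String) (x : String) :
    (gapStep kset fp dflt S x).2 = if kset.contains x then some x else S.2 := by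
  unfold gapStep
  by_cases hcx : kset.contains x = true
  · rw [if_pos hcx, if_pos hcx]
  · rw [if_neg hcx, if_neg hcx]
    by_cases hd : S.1.contains x = true
    · rw [if_pos hd]
    · rw [if_neg hd]
      cases S.2 <;> rfl

theorem gapstate_snd (kset : PySem.Set String) (fp : PySem.Dict String Int) (dflt : Int)
    (l : List String) :
    (l.foldl (gapStep kset fp dflt) (PySem.Dict.empty, none)).2 = lastCommon kset l := by
  induction l using List.reverseRecOn with
  | nil => rfl
  | append_singleton l x ih =>
    rw [List.foldl_append, List.foldl_cons, List.foldl_nil, gapStep_snd, ih,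
      lastCommon_append_singleton]

theorem gapstate_get? (kset : PySem.Set String) (fp : PySem.Dict String Int) (dflt : Int)
    (l : List String) : ∀ k, kset.contains k = false →
    (l.foldl (gapStep kset fp dflt) (PySem.Dict.empty, none)).1.get? k
      = (PySem.List.index? l k).map (fun t =>
          match lastCommon kset (l.take t) with
          | some a => fp.getD a 0 + 1
          | none => dflt) := by
  induction l using List.reverseRecOn with
  | nil =>
    intro k _
    show (PySem.Dict.empty : PySem.Dict String Int).get? k = _
    rw [PySem.Dict.get?_empty]
    rfl
  | append_singleton l x ih =>
    intro k hbadk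
    rw [List.foldl_append, List.foldl_cons, List.foldl_nil]
    by_cases hcx : kset.contains x = true
    · rw [show gapStep kset fp dflt (l.foldl (gapStep kset fp dflt) (PySem.Dict.empty, none)) x
          = ((l.foldl (gapStep kset fp dflt) (PySem.Dict.empty, none)).1, some x) by
        unfold gapStep; rw [if_pos hcx]]
      rw [ih k hbadk]
      apply (gapArg_append kset fp dflt l x k _).symm
      by_cases hkl : k ∈ l
      · exact Or.inl hkl
      · refine Or.inr (fun hm => ?_)
        rcases List.mem_append.1 hm with hm | hm
        · exact hkl hm
        · simp at hm; subst hm; rw [hcx] at hbadk; cases hbadk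
    · rw [show gapStep kset fp dflt (l.foldl (gapStep kset fp dflt) (PySem.Dict.empty, none)) x
          = (if (l.foldl (gapStep kset fp dflt) (PySem.Dict.empty, none)).1.contains x then
              l.foldl (gapStep kset fp dflt) (PySem.Dict.empty, none)
            else match (l.foldl (gapStep kset fp dflt) (PySem.Dict.empty, none)).2 with
              | some last => ((l.foldl (gapStep kset fp dflt) (PySem.Dict.empty, none)).1.insert x (fp.getD last 0 + 1),
                  (l.foldl (gapStep kset fp dflt) (PySem.Dict.empty, none)).2)
              | none => ((l.foldl (gapStep kset fp dflt) (PySem.Dict.empty, none)).1.insert x dflt,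
                  (l.foldl (gapStep kset fp dflt) (PySem.Dict.empty, none)).2)) by
        unfold gapStep; rw [if_neg hcx]]
      by_cases hd : (l.foldl (gapStep kset fp dflt) (PySem.Dict.empty, none)).1.contains x = true
      · rw [if_pos hd]
        have hxl : x ∈ l := by
          rw [PySem.Dict.contains_eq_isSome_get?, ih x (Bool.eq_false_iff.2 hcx)] at hd
          rcases hx : PySem.List.index? l x with _ | t
          · rw [hx] at hd; simp at hd
          · exact (PySem.List.index?_isSome_iff l x).1 (by rw [hx]; rfl)
        rw [ih k hbadk]
        apply (gapArg_append kset fp dflt l x k _).symm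
        by_cases hkl : k ∈ l
        · exact Or.inl hkl
        · refine Or.inr (fun hm => ?_)
          rcases List.mem_append.1 hm with hm | hm
          · exact hkl hm
          · simp at hm; subst hm; exact hkl hxl
      · rw [if_neg hd]
        have hxl : x ∉ l := by
          intro hm
          rw [PySem.Dict.contains_eq_isSome_get?, ih x (Bool.eq_false_iff.2 hcx)] at hd
          obtain ⟨t0, ht0⟩ := Option.isSome_iff_exists.1 ((PySem.List.index?_isSome_iff l x).2 hm)
          rw [ht0] at hd
          simp at hd
        have hsnd := gapstate_snd kset fp dflt l
        by_cases hkx : k = x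
        · subst hkx
          cases hS2 : (l.foldl (gapStep kset fp dflt) (PySem.Dict.empty, none)).2 with
          | none =>
            show ((l.foldl (gapStep kset fp dflt) (PySem.Dict.empty, none)).1.insert k dflt).get? k = _
            rw [PySem.Dict.get?_insert_self]
            rw [PySem.List.index?_append_singleton_self l k hxl]
            rw [hS2] at hsnd
            simp only [Option.map_some]
            rw [List.take_append_of_le_length (le_refl _), List.take_length, ← hsnd]
          | some a0 =>
            show ((l.foldl (gapStep kset fp dflt) (PySem.Dict.empty, none)).1.insert k (fp.getD a0 0 + 1)).get? k = _
            rw [PySem.Dict.get?_insert_self]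
            rw [PySem.List.index?_append_singleton_self l k hxl]
            rw [hS2] at hsnd
            simp only [Option.map_some]
            rw [List.take_append_of_le_length (le_refl _), List.take_length, ← hsnd]
        · have hget : (match (l.foldl (gapStep kset fp dflt) (PySem.Dict.empty, none)).2 with
              | some last => ((l.foldl (gapStep kset fp dflt) (PySem.Dict.empty, none)).1.insert x (fp.getD last 0 + 1),
                  (l.foldl (gapStep kset fp dflt) (PySem.Dict.empty, none)).2)
              | none => ((l.foldl (gapStep kset fp dflt) (PySem.Dict.empty, none)).1.insert x dflt,
                  (l.foldl (gapStep kset fp dflt) (PySem.Dict.empty, none)).2)).1.get? k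
              = (l.foldl (gapStep kset fp dflt) (PySem.Dict.empty, none)).1.get? k := by
            cases (l.foldl (gapStep kset fp dflt) (PySem.Dict.empty, none)).2 with
            | none => exact PySem.Dict.get?_insert_of_ne _ _ hkx
            | some a0 => exact PySem.Dict.get?_insert_of_ne _ _ hkx
          rw [hget, ih k hbadk]
          apply (gapArg_append kset fp dflt l x k _).symm
          by_cases hkl : k ∈ l
          · exact Or.inl hkl
          · refine Or.inr (fun hm => ?_)
            rcases List.mem_append.1 hm with hm | hm
            · exact hkl hm
            · simp at hm; exact hkx hm

theorem gapof_getD (kok tsu : List String) (k : String)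
    (hk : k ∈ tsu) (hbad : (PySem.Set.ofList kok).contains k = false) :
    (tsu.foldl (gapStep (PySem.Set.ofList kok)
        ((PySem.List.enumerate kok 0).foldl (fun d p => d.setdefault p.2 p.1) PySem.Dict.empty)
        (pvFirstCommonGap (PySem.Set.ofList kok)
          ((PySem.List.enumerate kok 0).foldl (fun d p => d.setdefault p.2 p.1) PySem.Dict.empty)
          (kok.length : Int) tsu)) (PySem.Dict.empty, none)).1.getD k 0
      = ((gapOf (PySem.Set.ofList kok) kok tsu k : Nat) : Int) := by
  obtain ⟨t0, ht0⟩ := Option.isSome_iff_exists.1 ((PySem.List.index?_isSome_iff tsu k).2 hk)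
  simp only [PySem.Dict.getD]
  rw [gapstate_get? _ _ _ tsu k hbad, ht0]
  simp only [Option.map_some, Option.getD_some]
  unfold gapOf
  rw [ht0]
  simp only [Option.getD_some]
  cases hl : lastCommon (PySem.Set.ofList kok) (tsu.take t0) with
  | some a =>
    have ha : a ∈ kok := contains_ofList_iff.1 (lastCommon_spec _ hl)
    have h1 : ((PySem.List.enumerate kok 0).foldl (fun d p => d.setdefault p.2 p.1) PySem.Dict.empty).getD a 0 + 1
        = (((PySem.List.index? kok a).getD 0 + 1 : Nat) : Int) := by
      rw [firstpos_getD ha]; push_cast; ring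
    exact h1
  | none =>
    have h2 : pvFirstCommonGap (PySem.Set.ofList kok)
          ((PySem.List.enumerate kok 0).foldl (fun d p => d.setdefault p.2 p.1) PySem.Dict.empty)
          (kok.length : Int) tsu
        = (((match firstCommon (PySem.Set.ofList kok) tsu with
            | some c => (PySem.List.index? kok c).getD 0
            | none => kok.length) : Nat) : Int) := by
      rw [firstCommonGap_eq kok tsu]
      cases hf : firstCommon (PySem.Set.ofList kok) tsu <;> simp
    exact h2

theorem groups_getD (kset : PySem.Set String) (gapD : String → Int) (tsu : List String) (c : Int) :
    (tsu.foldl (fun g k => if kset.contains k then g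
        else g.modify (gapD k) [] (fun l => l ++ [k])) (PySem.Dict.empty : PySem.Dict Int (List String))).getD c []
      = (tsu.filter (fun k => !kset.contains k)).filter (fun k => gapD k == c) := by
  rw [PySem.List.foldl_congr_mem tsu _
      (fun g k => if (!kset.contains k) then g.modify (gapD k) [] (fun l => l ++ [k]) else g)
      _ (fun acc x _ => by by_cases h : kset.contains x = true <;> simp [h])]
  rw [PySem.List.foldl_if_eq_foldl_filter]
  rw [← List.foldl_map (f := fun k => ((gapD k, k) : Int × String))
      (g := fun (d : PySem.Dict Int (List String)) (p : Int × String) => d.modify p.1 [] (fun l => l ++ [p.2]))]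
  rw [PySem.Dict.getD_foldl_modify_append]
  rw [List.filter_map]
  simp [List.map_map, Function.comp_def]

theorem emit_render (d : PySem.Dict Int (List String)) : ∀ (ks : List String) (s : Int) (acc : List String),
    (PySem.List.enumerate ks s).foldl (fun res p => (res ++ d.getD p.1 []) ++ [p.2]) acc ++ d.getD (s + ks.length) []
      = acc ++ gapRender ks (fun i => d.getD (s + i) []) := by
  intro ks
  induction ks with
  | nil =>
    intro s acc
    show acc ++ d.getD (s + ((List.length ([] : List String) : Nat) : Int)) [] = _
    show _ = acc ++ d.getD (s + ((0:Nat):Int)) []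
    rfl
  | cons x t ih =>
    intro s acc
    rw [PySem.List.enumerate_cons]
    simp only [List.foldl_cons]
    have hcast : (((x :: t).length : Nat) : Int) = 1 + (t.length : Int) := by push_cast; simp; ring
    rw [show s + (((x :: t).length : Nat) : Int) = (s + 1) + (t.length : Int) by rw [hcast]; ring]
    rw [ih (s+1) ((acc ++ d.getD s []) ++ [x])]
    show _ = acc ++ (d.getD (s + ((0:Nat):Int)) [] ++ x :: gapRender t (fun i => d.getD (s + (((i+1 : Nat)) : Int)) []))
    rw [show (fun i : Nat => d.getD (s + (((i+1 : Nat)) : Int)) []) = (fun i : Nat => d.getD ((s + 1) + (i : Int)) []) from funext fun i => by push_cast; ring_nf]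
    simp

theorem emit_render0 (d : PySem.Dict Int (List String)) (ks : List String) :
    (PySem.List.enumerate ks 0).foldl (fun res p => (res ++ d.getD p.1 []) ++ [p.2]) [] ++ d.getD (ks.length : Int) []
      = gapRender ks (fun i => d.getD (i : Int) []) := by
  have h := emit_render d ks 0 []
  rw [zero_add] at h
  rw [show (fun i : Nat => d.getD ((0 : Int) + (i : Int)) []) = (fun i : Nat => d.getD (i : Int) []) from funext fun i => by rw [zero_add]] at h
  simpa using h

theorem gapRender_const_nil (ks : List String) : gapRender ks (fun _ => []) = ks := by
  induction ks with
  | nil => rfl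
  | cons x t ih => simp [gapRender, ih]


theorem build_master_order_eq_render (kok tsu : List String) :
    build_master_order kok tsu
      = gapRender kok (fun i =>
          (tsu.filter (fun k => !((PySem.Set.ofList kok).contains k))).filter
            (fun k => gapOf (PySem.Set.ofList kok) kok tsu k == i)) := by
  have h1 : ∀ x ∈ tsu.filter (fun k => !((PySem.Set.ofList kok).contains k)),
      (PySem.Set.ofList kok).contains x = false ∧ x ∈ tsu := fun x hx =>
    ⟨by simpa using (List.mem_filter.1 hx).2, (List.mem_filter.1 hx).1⟩
  have h2 : pvBad (PySem.Set.ofList kok) (fun _ => []) := fun i s hs => by cases hs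
  have h0 := A_loop (kok := kok) (tsu := tsu)
    (tsu.filter fun k => !((PySem.Set.ofList kok).contains k)) (fun _ => []) h1 h2
  rw [gapRender_const_nil] at h0
  show (tsu.filter fun k => !((PySem.Set.ofList kok).contains k)).foldl
      (fun master key => pvStepA (PySem.Set.ofList kok) tsu master key) kok = _
  rw [h0]
  apply gapRender_congr
  intro i
  rw [foldl_gapBump_apply]
  simp

theorem build_master_order_alt_eq_render (kok tsu : List String) :
    build_master_order_alt kok tsu
      = gapRender kok (fun i =>
          (tsu.filter (fun k => !((PySem.Set.ofList kok).contains k))).filter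
            (fun k => gapOf (PySem.Set.ofList kok) kok tsu k == i)) := by
  show (PySem.List.enumerate kok 0).foldl
      (fun res p => (res ++ (tsu.foldl (fun g k =>
          if (PySem.Set.ofList kok).contains k then g
          else g.modify ((tsu.foldl (gapStep (PySem.Set.ofList kok)
              ((PySem.List.enumerate kok 0).foldl (fun d p => d.setdefault p.2 p.1) PySem.Dict.empty)
              (pvFirstCommonGap (PySem.Set.ofList kok)
                ((PySem.List.enumerate kok 0).foldl (fun d p => d.setdefault p.2 p.1) PySem.Dict.empty)
                (kok.length : Int) tsu)) (PySem.Dict.empty, none)).1.getD k 0) [] (fun l => l ++ [k]))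
          PySem.Dict.empty).getD p.1 []) ++ [p.2]) []
      ++ (tsu.foldl (fun g k =>
          if (PySem.Set.ofList kok).contains k then g
          else g.modify ((tsu.foldl (gapStep (PySem.Set.ofList kok)
              ((PySem.List.enumerate kok 0).foldl (fun d p => d.setdefault p.2 p.1) PySem.Dict.empty)
              (pvFirstCommonGap (PySem.Set.ofList kok)
                ((PySem.List.enumerate kok 0).foldl (fun d p => d.setdefault p.2 p.1) PySem.Dict.empty)
                (kok.length : Int) tsu)) (PySem.Dict.empty, none)).1.getD k 0) [] (fun l => l ++ [k]))
          PySem.Dict.empty).getD (kok.length : Int) [] = _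
  rw [emit_render0]
  apply gapRender_congr
  intro i
  rw [groups_getD]
  apply List.filter_congr
  intro x hx
  have hmem : x ∈ tsu := (List.mem_filter.1 hx).1
  have hbadx : (PySem.Set.ofList kok).contains x = false := by
    simpa using (List.mem_filter.1 hx).2
  rw [gapof_getD kok tsu x hmem hbadx]
  simp

-- ===== VERDICT (by name: the statement is the Claim_ definition above) =====
theorem build_master_order_spec : Claim_equal_build_master_order := by
  intro kok tsu _
  unfold Spec_build_master_order
  rw [build_master_order_eq_render, build_master_order_alt_eq_render]
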